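-- pv_equiv track=rewrite | github.com/kavi20002/AI-Powered-Finance-Assitant | tools/budget_checker.py | build_budget_overview
-- ===== SOURCE A (Python) =====
-- from typing import Any
--
-- def build_budget_overview(analysis: dict[str, Any]) -> str:
--     overspent = [k for k, v in analysis.items() if v.get("status") == "overspent"]
--     unplanned = [k for k, v in analysis.items() if v.get("status") == "unplanned"]
--
--     if not overspent and not unplanned:
--         return "Great job. All categories are within budget."
--
--     messages = []
--
--     if overspent:
--         messages.append("Overspent: " + ", ".join(sorted(overspent)))
--
--     if unplanned:
--         messages.append("Unplanned: " + ", ".join(sorted(unplanned)))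
--
--     return " | ".join(messages)
-- ===== SOURCE B (Python) =====
-- def build_budget_overview(analysis: dict) -> str:
--     buckets = {}
--     for k, v in analysis.items():
--         buckets.setdefault(v.get("status"), []).append(k)
--     parts = [label + ": " + ", ".join(sorted(buckets[st]))
--              for st, label in (("overspent", "Overspent"), ("unplanned", "Unplanned"))
--              if st in buckets]
--     return " | ".join(parts) if parts else "Great job. All categories are within budget."
-- ===== Notes on version B (the rewrite author's own statement) =====
-- stated objective: alternative
-- what changed: A filters analysis twice, once per status; B makes one grouping pass that buckets every key by its status into a dict, then builds the message parts table-driven from (status, label) pairs.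
import Mathlib
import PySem

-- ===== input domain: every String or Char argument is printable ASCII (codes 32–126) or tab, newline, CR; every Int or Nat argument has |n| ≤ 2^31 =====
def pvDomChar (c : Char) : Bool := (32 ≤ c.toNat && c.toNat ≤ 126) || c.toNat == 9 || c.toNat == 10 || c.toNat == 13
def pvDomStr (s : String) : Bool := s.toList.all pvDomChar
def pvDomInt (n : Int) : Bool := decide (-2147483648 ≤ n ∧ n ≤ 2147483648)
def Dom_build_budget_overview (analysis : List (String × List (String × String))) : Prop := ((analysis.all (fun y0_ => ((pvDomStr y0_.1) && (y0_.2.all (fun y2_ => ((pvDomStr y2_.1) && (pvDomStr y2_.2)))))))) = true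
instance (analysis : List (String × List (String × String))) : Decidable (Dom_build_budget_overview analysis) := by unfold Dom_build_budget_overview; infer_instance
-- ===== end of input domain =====

-- B replaces A's two status-specific filtering scans by one grouping pass into a dict of
-- buckets keyed by status, with the message parts built table-driven; alternative, not faster.

-- shared helper: v.get("status") on the inner dict (first-match association-list lookup)
def statusOf (v : List (String × String)) : Option String :=
  (PySem.Dict.mk v).get? "status"

-- ===== PORT A =====
def build_budget_overview (analysis : List (String × List (String × String))) : String :=
  let overspent := analysis.filterMap (fun p => if statusOf p.2 = some "overspent" then some p.1 else none)
  let unplanned := analysis.filterMap (fun p => if statusOf p.2 = some "unplanned" then some p.1 else none)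
  if overspent.isEmpty && unplanned.isEmpty then
    "Great job. All categories are within budget."
  else
    let messages : List String := []
    let messages := if !overspent.isEmpty then
        messages ++ ["Overspent: " ++ PySem.Str.join ", " (PySem.List.sorted overspent (fun x => x) false)]
      else messages
    let messages := if !unplanned.isEmpty then
        messages ++ ["Unplanned: " ++ PySem.Str.join ", " (PySem.List.sorted unplanned (fun x => x) false)]
      else messages
    PySem.Str.join " | " messages

-- ===== PORT B =====
-- buckets.setdefault(s, []).append(k) is exactly d.modify s [] (· ++ [k]);
-- buckets[st] is guarded by 'st in buckets', so the total getD with default [] is exact there.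
def build_budget_overview_alt (analysis : List (String × List (String × String))) : String :=
  let buckets := analysis.foldl (fun d p => d.modify (statusOf p.2) [] (· ++ [p.1])) PySem.Dict.empty
  let parts := ([("overspent", "Overspent"), ("unplanned", "Unplanned")] : List (String × String)).filterMap
    (fun q => if buckets.contains (some q.1) then
        some (q.2 ++ ": " ++ PySem.Str.join ", " (PySem.List.sorted (buckets.getD (some q.1) []) (fun x => x) false))
      else none)
  if parts.isEmpty then "Great job. All categories are within budget."
  else PySem.Str.join " | " parts

-- ===== PRECONDITION & SPEC =====
def Spec_build_budget_overview (analysis : List (String × List (String × String))) (out : String) : Prop := out = build_budget_overview_alt analysis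
instance (analysis : List (String × List (String × String))) (out : String) : Decidable (Spec_build_budget_overview analysis out) := by unfold Spec_build_budget_overview; infer_instance

-- ===== CLAIM (what is proved, stated in full; the proofs are below) =====
def Claim_equal_build_budget_overview : Prop := ∀ (analysis : List (String × List (String × String))), Dom_build_budget_overview analysis → Spec_build_budget_overview analysis (build_budget_overview analysis)

-- ===== LEMMAS AND PROOFS =====

-- the keys picked out of `l` whose status is `s`
def pickedBy (l : List (String × List (String × String))) (s : Option String) : List String :=
  l.filterMap (fun p => if statusOf p.2 = s then some p.1 else none)

theorem getD_bucket_fold (l : List (String × List (String × String)))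
    (d : PySem.Dict (Option String) (List String)) (s : Option String) :
    (l.foldl (fun d p => d.modify (statusOf p.2) [] (· ++ [p.1])) d).getD s []
      = d.getD s [] ++ pickedBy l s := by
  induction l generalizing d with
  | nil => simp [pickedBy]
  | cons p t ih =>
      simp only [List.foldl_cons, ih, pickedBy, List.filterMap_cons]
      by_cases h : statusOf p.2 = s
      · subst h
        simp [PySem.Dict.getD_modify_self]
      · simp [PySem.Dict.getD_modify, h, show ¬ s = statusOf p.2 from fun hh => h hh.symm]

theorem contains_bucket_fold (l : List (String × List (String × String)))
    (d : PySem.Dict (Option String) (List String)) (s : Option String) :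
    (l.foldl (fun d p => d.modify (statusOf p.2) [] (· ++ [p.1])) d).contains s
      = (d.contains s || !(pickedBy l s).isEmpty) := by
  induction l generalizing d with
  | nil => simp [pickedBy]
  | cons p t ih =>
      simp only [List.foldl_cons, ih, pickedBy, List.filterMap_cons]
      by_cases h : statusOf p.2 = s
      · subst h
        simp [PySem.Dict.contains_modify]
      · simp [PySem.Dict.contains_modify, h,
          show (s == statusOf p.2) = false from beq_eq_false_iff_ne.mpr (fun hh => h hh.symm)]

theorem build_budget_overview_eq (analysis : List (String × List (String × String))) :
    build_budget_overview analysis = build_budget_overview_alt analysis := by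
  unfold build_budget_overview build_budget_overview_alt
  have hO : analysis.filterMap (fun p => if statusOf p.2 = some "overspent" then some p.1 else none)
      = pickedBy analysis (some "overspent") := rfl
  have hU : analysis.filterMap (fun p => if statusOf p.2 = some "unplanned" then some p.1 else none)
      = pickedBy analysis (some "unplanned") := rfl
  simp only [List.filterMap_cons, List.filterMap_nil,
    getD_bucket_fold, contains_bucket_fold,
    PySem.Dict.getD_empty, PySem.Dict.contains_empty, List.nil_append, Bool.false_or, hO, hU]
  by_cases ho : (pickedBy analysis (some "overspent")).isEmpty <;>
  by_cases hu : (pickedBy analysis (some "unplanned")).isEmpty <;>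
    simp [ho, hu]

-- ===== VERDICT (by name: the statement is the Claim_ definition above) =====
theorem build_budget_overview_spec : Claim_equal_build_budget_overview := by
  intro analysis _
  unfold Spec_build_budget_overview
  exact build_budget_overview_eq analysis
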